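-- pv_equiv track=rewrite | github.com/yoshi-60/py-info | Python3/sin_func.py | wave_select
-- ===== SOURCE A (Python) =====
-- def wave_select(bin_str):
--   blen = len(bin_str)
--   slen = 2 * blen
--   bstr = bin_str[blen-1] + bin_str + bin_str[0]
--   slist = [0 for idx in range(slen)]
--   idx = 0
--   for ib in range(blen):
--     b0 = bstr[ib:ib+2]
--     b1 = bstr[ib+1:ib+3]
--     if b0 == '01' and (ib % 2)== 0 :
--       slist[idx] = 1
--     elif b0 == '01' :
--       slist[idx] = 2
--     elif b0 == '10' and (ib % 2)==0 :
--       slist[idx] = 2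
--     elif b0 == '10' :
--       slist[idx] = 1
--     elif b0 == '11' :
--       slist[idx] = 3
--     else:
--       slist[idx] = 0
--     idx = idx + 1
--     if b1 == '01' and (ib % 2)== 0 :
--       slist[idx] = 2
--     elif b1 == '01' :
--       slist[idx] = 1
--     elif b1 == '10' and (ib % 2)==0 :
--       slist[idx] = 1
--     elif b1 == '10' :
--       slist[idx] = 2
--     elif b1 == '11' :
--       slist[idx] = 3
--     else:
--       slist[idx] = 0
--     idx = idx + 1
--   return slist
-- ===== SOURCE B (Python) =====
-- def wave_select(bin_str):
--     b = bin_str[-1] + bin_str + bin_str[0]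
--     table = ({'01': 1, '10': 2, '11': 3}, {'01': 2, '10': 1, '11': 3})
--     v = [table[k % 2].get(a + c, 0) for k, (a, c) in enumerate(zip(b, b[1:]))]
--     mid = []
--     for x in v[1:-1]:
--         mid += (x, x)
--     return [v[0]] + mid + [v[-1]]
-- ===== Notes on version B (the rewrite author's own statement) =====
-- stated objective: simpler
-- what changed: A preallocates a 2n slot list and fills it in place, advancing an index through two six-way if/elif chains per loop iteration; B has no branches and no index bookkeeping: it zips the wrapped string with its shifted self, maps each adjacent pair through one of two parity lookup dictionaries to get a value table v, and reshapes v into the output as v[0] + each interior value doubled + v[-1].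
import Mathlib
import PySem

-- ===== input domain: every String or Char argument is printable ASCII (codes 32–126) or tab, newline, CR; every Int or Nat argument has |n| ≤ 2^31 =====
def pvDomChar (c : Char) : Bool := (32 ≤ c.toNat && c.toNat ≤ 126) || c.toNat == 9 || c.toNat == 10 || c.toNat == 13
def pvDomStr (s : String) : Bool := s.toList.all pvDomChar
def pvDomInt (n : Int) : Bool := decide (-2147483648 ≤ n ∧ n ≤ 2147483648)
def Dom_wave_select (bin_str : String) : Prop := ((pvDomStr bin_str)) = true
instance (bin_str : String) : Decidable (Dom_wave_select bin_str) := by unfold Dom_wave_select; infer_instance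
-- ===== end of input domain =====

-- B replaces A's in-place slot filling through two six-way if/elif chains per iteration with a
-- branch-free value pass (two parity dictionaries looked up on adjacent character pairs) followed
-- by a separate reshaping pass that doubles the interior values; objective: simpler.

-- ===== PORT A =====
-- loop body of A (the two if-chains writing slots idx and idx+1), kept as a named helper
def waveStepA (bstr : List Char) (st : List Int × Int) (ib : Int) : List Int × Int :=
  let slist := st.1
  let idx := st.2
  let b0 := PySem.List.slice bstr (some ib) (some (ib + 2))
  let b1 := PySem.List.slice bstr (some (ib + 1)) (some (ib + 3))
  let slist :=
    if b0 = ['0','1'] ∧ PySem.Int.mod ib 2 = 0 then PySem.List.pySetD slist idx 1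
    else if b0 = ['0','1'] then PySem.List.pySetD slist idx 2
    else if b0 = ['1','0'] ∧ PySem.Int.mod ib 2 = 0 then PySem.List.pySetD slist idx 2
    else if b0 = ['1','0'] then PySem.List.pySetD slist idx 1
    else if b0 = ['1','1'] then PySem.List.pySetD slist idx 3
    else PySem.List.pySetD slist idx 0
  let idx := idx + 1
  let slist :=
    if b1 = ['0','1'] ∧ PySem.Int.mod ib 2 = 0 then PySem.List.pySetD slist idx 2
    else if b1 = ['0','1'] then PySem.List.pySetD slist idx 1
    else if b1 = ['1','0'] ∧ PySem.Int.mod ib 2 = 0 then PySem.List.pySetD slist idx 1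
    else if b1 = ['1','0'] then PySem.List.pySetD slist idx 2
    else if b1 = ['1','1'] then PySem.List.pySetD slist idx 3
    else PySem.List.pySetD slist idx 0
  (slist, idx + 1)

def wave_select (bin_str : String) : List Int :=
  let bl := bin_str.toList
  let blen : Int := (bl.length : Int)
  let slen : Int := 2 * blen
  match PySem.List.pyGet? bl (blen - 1), PySem.List.pyGet? bl 0 with
  | some cLast, some cFirst =>
    let bstr : List Char := cLast :: (bl ++ [cFirst])
    let slist : List Int := (PySem.List.pyRange 0 slen 1).map (fun _ => 0)
    ((PySem.List.pyRange 0 blen 1).foldl (waveStepA bstr) (slist, 0)).1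
  | _, _ => []  -- unreachable under Pre_: Python raises IndexError on the empty string

-- ===== PORT B =====
-- the two parity lookup tables (Python: ({'01':1,'10':2,'11':3}, {'01':2,'10':1,'11':3}))
def wsTbl0 : PySem.Dict String Int := PySem.Dict.ofList [("01", 1), ("10", 2), ("11", 3)]
def wsTbl1 : PySem.Dict String Int := PySem.Dict.ofList [("01", 2), ("10", 1), ("11", 3)]

def wave_select_alt (bin_str : String) : List Int :=
  let bl := bin_str.toList
  match PySem.List.pyGet? bl (-1) with
  | none => []  -- unreachable under Pre_: Python raises IndexError on the empty string
  | some cLast =>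
    match PySem.List.pyGet? bl 0 with
    | none => []
    | some cFirst =>
      let b : List Char := cLast :: (bl ++ [cFirst])
      -- v = [table[k % 2].get(a + c, 0) for k, (a, c) in enumerate(zip(b, b[1:]))]
      -- (Python indexes the 2-tuple 'table' with k % 2; ported as the two-way choice)
      let v : List Int := (PySem.List.enumerate (b.zip (PySem.List.slice b (some 1) none))).map
        (fun kp => PySem.Dict.getD (if PySem.Int.mod kp.1 2 = 0 then wsTbl0 else wsTbl1)
          (String.ofList [kp.2.1, kp.2.2]) 0)
      let mid : List Int := (PySem.List.slice v (some 1) (some (-1))).foldl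
        (fun out x => out ++ [x, x]) []
      match PySem.List.pyGet? v 0 with
      | none => []  -- unreachable: v is nonempty whenever bl is
      | some v0 =>
        match PySem.List.pyGet? v (-1) with
        | none => []
        | some vn => [v0] ++ mid ++ [vn]

-- ===== PRECONDITION & SPEC =====
-- Pre_ excludes only the empty string, on which both A and B raise IndexError.
def Pre_wave_select (bin_str : String) : Prop := bin_str ≠ ""
instance (bin_str : String) : Decidable (Pre_wave_select bin_str) := by unfold Pre_wave_select; infer_instance
def pvWitness_wave_select : String := "0110"

def Spec_wave_select (bin_str : String) (out : List Int) : Prop := out = wave_select_alt bin_str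
instance (bin_str : String) (out : List Int) : Decidable (Spec_wave_select bin_str out) := by unfold Spec_wave_select; infer_instance

-- ===== CLAIM (what is proved, stated in full; the proofs are below) =====
def Claim_equal_wave_select : Prop := ∀ (bin_str : String), Dom_wave_select bin_str → Pre_wave_select bin_str → Spec_wave_select bin_str (wave_select bin_str)

-- ===== LEMMAS AND PROOFS =====
-- the common pair value both ports compute: value of pair p at parity k
def pairVal (pair : List Char) (k : Int) : Int :=
  if pair = ['0','1'] then (if PySem.Int.mod k 2 = 0 then 1 else 2)
  else if pair = ['1','0'] then (if PySem.Int.mod k 2 = 0 then 2 else 1)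
  else if pair = ['1','1'] then 3
  else 0

-- the value of the pair starting at position j of bstr, with j's parity
def waveVal (bstr : List Char) (j : Nat) : Int :=
  pairVal (PySem.List.slice bstr (some (j : Int)) (some ((j : Int) + 2))) (j : Int)

lemma mod2_flip (j : Nat) : (PySem.Int.mod ((j : Int) + 1) 2 = 0) ↔ ¬ (PySem.Int.mod (j : Int) 2 = 0) := by
  rw [PySem.Int.mod_eq_emod_of_pos (by omega : (0:Int) < 2),
    PySem.Int.mod_eq_emod_of_pos (by omega : (0:Int) < 2)]
  omega

lemma flatMap_pairs_length (f : Nat → List Int) (h : ∀ j, (f j).length = 2) (k : Nat) :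
    ((List.range k).flatMap f).length = 2 * k := by
  induction k with
  | zero => simp
  | succ k ih => simp [List.range_succ, ih, h k]; omega

-- A's first if-chain is a single write of the pair value
lemma chainA0 (slist : List Int) (idx : Int) (b0 : List Char) (ib : Int) :
    (if b0 = ['0','1'] ∧ PySem.Int.mod ib 2 = 0 then PySem.List.pySetD slist idx 1
     else if b0 = ['0','1'] then PySem.List.pySetD slist idx 2
     else if b0 = ['1','0'] ∧ PySem.Int.mod ib 2 = 0 then PySem.List.pySetD slist idx 2
     else if b0 = ['1','0'] then PySem.List.pySetD slist idx 1
     else if b0 = ['1','1'] then PySem.List.pySetD slist idx 3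
     else PySem.List.pySetD slist idx 0) = PySem.List.pySetD slist idx (pairVal b0 ib) := by
  simp only [pairVal]
  split_ifs <;> first | rfl | tauto

-- A's second if-chain at ib = j is a single write of the pair value at parity j+1
lemma chainA1 (slist : List Int) (idx : Int) (b1 : List Char) (j : Nat) :
    (if b1 = ['0','1'] ∧ PySem.Int.mod (j : Int) 2 = 0 then PySem.List.pySetD slist idx 2
     else if b1 = ['0','1'] then PySem.List.pySetD slist idx 1
     else if b1 = ['1','0'] ∧ PySem.Int.mod (j : Int) 2 = 0 then PySem.List.pySetD slist idx 1
     else if b1 = ['1','0'] then PySem.List.pySetD slist idx 2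
     else if b1 = ['1','1'] then PySem.List.pySetD slist idx 3
     else PySem.List.pySetD slist idx 0) = PySem.List.pySetD slist idx (pairVal b1 ((j : Int) + 1)) := by
  have hflip := mod2_flip j
  simp only [pairVal]
  split_ifs <;> first | rfl | tauto

-- the two writes of one iteration land on the first two cells of the zero tail
lemma twoSets (P : List Int) (k m : Nat) (v w : Int) (hP : P.length = 2 * k) :
    PySem.List.pySetD (PySem.List.pySetD (P ++ List.replicate ((m + 1) + 1) (0 : Int))
        (2 * (k : Int)) v) (2 * (k : Int) + 1) w
    = P ++ [v, w] ++ List.replicate m 0 := by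
  rw [show (2 * (k : Int)) = ((2 * k : Nat) : Int) by push_cast; ring,
    PySem.List.pySetD_natCast,
    show ((2 * k : Nat) : Int) + 1 = ((2 * k + 1 : Nat) : Int) by push_cast; ring,
    PySem.List.pySetD_natCast]
  rw [List.replicate_succ, List.replicate_succ]
  have h1 : (P ++ 0 :: 0 :: List.replicate m (0 : Int)).set (2 * k) v
      = P ++ v :: 0 :: List.replicate m 0 := by
    rw [List.set_append_right _ _ hP.le, hP]
    simp
  rw [h1]
  rw [List.set_append_right _ _ (le_trans hP.le (by omega)), hP]
  simp

lemma foldA_eq (bstr : List Char) (n : Nat) :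
    ∀ k, k ≤ n →
    (PySem.List.pyRange 0 (k : Int) 1).foldl (waveStepA bstr) (List.replicate (2 * n) (0 : Int), 0)
    = ((List.range k).flatMap (fun j => [waveVal bstr j, waveVal bstr (j + 1)])
        ++ List.replicate (2 * (n - k)) 0, (2 * k : Int)) := by
  intro k
  induction k with
  | zero =>
    intro _
    rw [show ((0 : Nat) : Int) = 0 by norm_num, PySem.List.pyRange_one_eq_nil (by omega)]
    simp
  | succ k ih =>
    intro hk
    have hk' : k ≤ n := by omega
    rw [show ((k + 1 : Nat) : Int) = (k : Int) + 1 by push_cast; ring,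
      PySem.List.pyRange_one_succ_right (by positivity), List.foldl_append, ih hk',
      List.foldl_cons, List.foldl_nil]
    have hlen : ((List.range k).flatMap (fun j => [waveVal bstr j, waveVal bstr (j + 1)])).length = 2 * k :=
      flatMap_pairs_length _ (fun _ => rfl) k
    show waveStepA bstr _ _ = _
    unfold waveStepA
    simp only [chainA0, chainA1]
    rw [show 2 * (n - k) = (2 * (n - (k + 1)) + 1) + 1 by omega]
    rw [twoSets _ _ _ _ _ hlen]
    have hval : pairVal (PySem.List.slice bstr (some ((k : Int) + 1)) (some ((k : Int) + 3))) ((k : Int) + 1)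
        = waveVal bstr (k + 1) := by
      unfold waveVal
      norm_cast
    simp only [Prod.mk.injEq]
    refine ⟨?_, by ring⟩
    rw [hval, List.range_succ]
    simp [waveVal]

-- a two-character string key equals t iff the characters are t's
lemma key_eq_iff (a c : Char) (t : String) : (String.ofList [a, c] = t) ↔ [a, c] = t.toList := by
  constructor
  · intro h; simpa using congrArg String.toList h
  · intro h; have := congrArg String.ofList h; simpa using this

-- evaluation of a three-key literal table at the two-character key
lemma tbl_eval (a c : Char) (u w : Int) :
    PySem.Dict.getD (PySem.Dict.mk [("01", u), ("10", w), ("11", 3)]) (String.ofList [a, c]) 0 =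
    if a = '0' ∧ c = '1' then u else if a = '1' ∧ c = '0' then w else if a = '1' ∧ c = '1' then 3 else 0 := by
  have t01 : ("01" : String).toList = ['0','1'] := by decide
  have t10 : ("10" : String).toList = ['1','0'] := by decide
  have t11 : ("11" : String).toList = ['1','1'] := by decide
  have key : ∀ (t : String) (x y : Char), t.toList = [x, y] → ¬(a = x ∧ c = y) → (t == String.ofList [a, c]) = false := by
    intro t x y ht hne
    rw [beq_eq_false_iff_ne]
    intro h
    have := (key_eq_iff a c t).mp h.symm
    rw [ht] at this
    simp at this
    exact hne this
  by_cases h1 : a = '0' ∧ c = '1'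
  · obtain ⟨rfl, rfl⟩ := h1
    simp [PySem.Dict.getD, PySem.Dict.get?, List.find?]
  by_cases h2 : a = '1' ∧ c = '0'
  · obtain ⟨rfl, rfl⟩ := h2
    simp [PySem.Dict.getD, PySem.Dict.get?, List.find?]
  by_cases h3 : a = '1' ∧ c = '1'
  · obtain ⟨rfl, rfl⟩ := h3
    simp [PySem.Dict.getD, PySem.Dict.get?, List.find?]
  · simp only [PySem.Dict.getD, PySem.Dict.get?, if_neg h1, if_neg h2, if_neg h3]
    rw [List.find?_cons_of_neg, List.find?_cons_of_neg, List.find?_cons_of_neg] <;>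
      simp [key _ _ _ t01 h1, key _ _ _ t10 h2, key _ _ _ t11 h3]

-- B's dict lookup at parity k is exactly the pair value
lemma tblVal_eq (a c : Char) (k : Int) :
    PySem.Dict.getD (if PySem.Int.mod k 2 = 0 then wsTbl0 else wsTbl1) (String.ofList [a, c]) 0
      = pairVal [a, c] k := by
  have h0 : wsTbl0 = PySem.Dict.mk [("01", 1), ("10", 2), ("11", 3)] := by decide
  have h1 : wsTbl1 = PySem.Dict.mk [("01", 2), ("10", 1), ("11", 3)] := by decide
  by_cases h : PySem.Int.mod k 2 = 0 <;>
    simp only [h, if_true, if_false, h0, h1, tbl_eval, pairVal, List.cons.injEq, and_true]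

-- the slice b[j:j+2] is the two adjacent characters
lemma slice_two (b : List Char) (j : Nat) (h : j + 1 < b.length) :
    PySem.List.slice b (some (j : Int)) (some ((j : Int) + 2)) = [b[j], b[j + 1]] := by
  rw [show ((j : Int) + 2) = ((j : Int) + ((2 : Nat) : Int)) by norm_num,
    PySem.List.slice_natCast_add]
  rw [List.drop_eq_getElem_cons (by omega)]
  have h2 : b.drop (j + 1) = b[j + 1] :: b.drop (j + 2) := List.drop_eq_getElem_cons (by omega)
  rw [h2]
  rfl

-- B's value list v is the table of waveVal over positions 0..n
lemma vB_eq (b : List Char) (n : Nat) (hb : b.length = n + 2) :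
    (PySem.List.enumerate (b.zip (PySem.List.slice b (some 1) none))).map
      (fun kp => PySem.Dict.getD (if PySem.Int.mod kp.1 2 = 0 then wsTbl0 else wsTbl1)
        (String.ofList [kp.2.1, kp.2.2]) 0)
    = (List.range (n + 1)).map (fun j => waveVal b j) := by
  rw [PySem.List.slice_from_one]
  apply List.ext_getElem
  · simp [PySem.List.length_enumerate, hb]
  · intro i h1 h2
    have hi : i < n + 1 := by simpa [PySem.List.length_enumerate, hb] using h1
    simp only [List.getElem_map, PySem.List.getElem_enumerate, List.getElem_range]
    have hzip : (b.zip b.tail)[i]'(by simp [hb]; omega)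
        = (b[i]'(by omega), b.tail[i]'(by simp [hb]; omega)) := List.getElem_zip
    rw [hzip]
    have htail : b.tail[i]'(by simp [hb]; omega) = b[i + 1]'(by omega) := by
      simp [List.getElem_tail]
    rw [htail]
    rw [show ((0 : Int) + (i : Nat)) = (i : Int) by simp]
    rw [tblVal_eq]
    unfold waveVal
    rw [slice_two b i (by omega)]

-- Python's v[1:-1] is tail-and-dropLast
lemma slice_one_negone {α : Type} (xs : List α) :
    PySem.List.slice xs (some 1) (some (-1)) = xs.tail.dropLast := by
  unfold PySem.List.slice
  simp only [PySem.List.clampIdx_neg_one]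
  have h1 : PySem.List.clampIdx xs.length 1 = min 1 xs.length := by
    simp
  rw [h1]
  rcases xs with _ | ⟨x, xs⟩
  · simp
  · simp [List.dropLast_eq_take]

-- the doubling loop is a flatMap
lemma fold_double (l : List Int) :
    l.foldl (fun out x => out ++ [x, x]) [] = l.flatMap (fun x => [x, x]) := by
  have h : ∀ acc, l.foldl (fun out x => out ++ [x, x]) acc = acc ++ l.flatMap (fun x => [x, x]) := by
    induction l with
    | nil => intro acc; simp
    | cons x xs ih => intro acc; simp [ih, List.append_assoc]
  simpa using h []

-- reshaping: first value, doubled interior, last value = interleaved pairs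
lemma reshape_eq (f : Nat → Int) (n : Nat) (hn : 1 ≤ n) :
    [f 0] ++ ((List.range (n - 1)).map (fun j => f (j + 1))).flatMap (fun x => [x, x]) ++ [f n]
    = (List.range n).flatMap (fun j => [f j, f (j + 1)]) := by
  induction n with
  | zero => omega
  | succ m ih =>
    rcases Nat.eq_or_lt_of_le hn with h1 | h1
    · simp [← h1]
    · have hm : 1 ≤ m := by omega
      have hms : m + 1 - 1 = (m - 1) + 1 := by omega
      rw [hms, List.range_succ, List.map_append, List.flatMap_append, List.range_succ,
        List.flatMap_append, ← ih hm]
      have hmm : m - 1 + 1 = m := by omega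
      simp [hmm, List.append_assoc]

theorem wave_select_spec : Claim_equal_wave_select := by
  intro s _ hpre
  have hne : s.toList ≠ [] := by
    intro h
    exact hpre (by simpa using h)
  have hn1 : 1 ≤ s.toList.length := List.length_pos_iff.mpr hne
  obtain ⟨n, hn⟩ : ∃ n, s.toList.length = n + 1 := ⟨s.toList.length - 1, by omega⟩
  obtain ⟨cL, hL⟩ : ∃ c, PySem.List.pyGet? s.toList (-1) = some c := by
    rw [PySem.List.pyGet?_neg_one, List.getLast?_eq_getElem?]
    exact ⟨_, List.getElem?_eq_getElem (by omega)⟩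
  have hL' : PySem.List.pyGet? s.toList ((s.toList.length : Int) - 1) = some cL := by
    rw [PySem.List.pyGet?_neg_one, List.getLast?_eq_getElem?] at hL
    rw [show ((s.toList.length : Int) - 1) = ((s.toList.length - 1 : Nat) : Int) by omega,
      PySem.List.pyGet?_natCast]
    exact hL
  obtain ⟨cF, hF⟩ : ∃ c, PySem.List.pyGet? s.toList 0 = some c := by
    rw [PySem.List.pyGet?_zero]
    exact ⟨_, List.getElem?_eq_getElem (by omega)⟩
  unfold Spec_wave_select wave_select wave_select_alt
  simp only [hL, hL', hF]
  set b : List Char := cL :: (s.toList ++ [cF]) with hbdef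
  have hblen : b.length = (n + 1) + 2 := by simp [hbdef, hn]
  -- A side: the fold fills the 2n slots with the interleaved pair values
  have hinit : (PySem.List.pyRange 0 (2 * (s.toList.length : Int)) 1).map (fun _ => (0 : Int))
      = List.replicate (2 * s.toList.length) 0 := by
    rw [List.eq_replicate_iff]
    refine ⟨by rw [List.length_map, PySem.List.length_pyRange_one]; omega, ?_⟩
    intro x hx
    simp at hx
    obtain ⟨y, _, h⟩ := hx
    omega
  rw [hinit, foldA_eq b s.toList.length s.toList.length le_rfl]
  -- B side: v is the waveVal table, the reshape reproduces the interleaving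
  rw [vB_eq b (n + 1) hblen]
  set v : List Int := (List.range (n + 1 + 1)).map (fun j => waveVal b j) with hvdef
  have hv0 : PySem.List.pyGet? v 0 = some (waveVal b 0) := by
    rw [PySem.List.pyGet?_zero, hvdef]
    rw [List.getElem?_map]
    simp
  have hvn : PySem.List.pyGet? v (-1) = some (waveVal b (n + 1)) := by
    rw [PySem.List.pyGet?_neg_one, hvdef, List.getLast?_eq_getElem?]
    have hlv : ((List.range (n + 1 + 1)).map (fun j => waveVal b j)).length = n + 2 := by simp
    rw [hlv]
    simp [List.getElem?_eq_getElem]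
  rw [hv0, hvn]
  have hmid : PySem.List.slice v (some 1) (some (-1))
      = (List.range n).map (fun j => waveVal b (j + 1)) := by
    rw [slice_one_negone, hvdef]
    rw [List.range_succ_eq_map]
    simp only [List.map_cons, List.tail_cons]
    rw [List.map_map, List.range_succ, List.map_append]
    simp only [List.map_cons, List.map_nil]
    rw [List.dropLast_concat]
    rfl
  rw [hmid, fold_double]
  dsimp only
  rw [hn]
  simp only [Nat.sub_self, Nat.mul_zero, List.replicate_zero, List.append_nil]
  have hr := reshape_eq (fun j => waveVal b j) (n + 1) (by omega)
  simp only [Nat.add_sub_cancel] at hr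
  exact hr.symm
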